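-- pv_equiv track=rewrite | github.com/wikid24/ffxiv_mmd_tools_helper | ffxiv_mmd_tools_helper_beta/shape_keys.py | parse_shape_key_data_from_csv
-- ===== SOURCE A (Python) =====
-- def parse_shape_key_data_from_csv (csv_data):
--
-- 	# Create an empty dictionary
-- 	shape_key_dictionary = {}
--
-- 	# Iterate through each row and
-- 	for shape_key_bone_data in csv_data:
--
-- 		#group the data based on the first row(shape key name)
-- 		shape_key = shape_key_bone_data[0]
--
-- 		#if the shape_key does not exist in the dictionary yet, create a new list for it
-- 		if shape_key not in shape_key_dictionary:
-- 			shape_key_dictionary[shape_key] = []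
--
-- 		#add the row to the dictionary
-- 		shape_key_dictionary[shape_key].append(shape_key_bone_data)
--
-- 	# Iterate through the values of each row and parse out the first column (shape_key)
-- 	# because we don't want to pass that as part of the bone data in the following step
-- 	for shape_key in shape_key_dictionary:
-- 		bone_data = shape_key_dictionary[shape_key]
-- 		for i, j in enumerate(bone_data):
-- 			bone_data[i] = j[1:]
--
-- 	#for shape_key in shape_key_dictionary
-- 	#create_shape_key(armature,shape_key,shape_key_dictionary[shape_key])
--
-- 	return shape_key_dictionary
-- ===== SOURCE B (Python) =====
-- def parse_shape_key_data_from_csv(csv_data):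
--     # Different strategy: no accumulating dictionary. Compute the distinct shape
--     # keys in first-occurrence order, then build each group by filtering the
--     # whole csv for rows with that key, stripping the key with row[1:].
--     keys = list(dict.fromkeys(row[0] for row in csv_data))
--     return {key: [row[1:] for row in csv_data if row[0] == key] for key in keys}
-- ===== Notes on version B (the rewrite author's own statement) =====
-- stated objective: alternative
-- what changed: B keeps no accumulating dictionary at all: it first computes the ordered distinct keys (dict.fromkeys), then builds each group by an independent filtering pass over csv_data selecting rows with that key (storing row[1:]), instead of A's incremental grouping into a dict of lists followed by a second in-place stripping phase.
import Mathlib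
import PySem

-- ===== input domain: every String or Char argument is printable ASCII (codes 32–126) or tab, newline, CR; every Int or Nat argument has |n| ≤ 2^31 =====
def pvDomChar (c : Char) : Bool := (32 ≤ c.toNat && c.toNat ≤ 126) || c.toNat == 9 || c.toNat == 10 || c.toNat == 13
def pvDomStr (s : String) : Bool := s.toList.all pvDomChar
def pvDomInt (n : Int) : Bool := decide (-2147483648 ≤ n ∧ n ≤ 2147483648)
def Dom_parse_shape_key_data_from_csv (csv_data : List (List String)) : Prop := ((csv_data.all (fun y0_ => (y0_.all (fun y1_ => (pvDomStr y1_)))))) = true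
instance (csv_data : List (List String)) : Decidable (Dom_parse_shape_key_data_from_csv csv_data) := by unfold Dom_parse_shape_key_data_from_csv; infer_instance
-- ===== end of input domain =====

-- B builds the result without an accumulating dictionary: ordered distinct keys first
-- (dict.fromkeys), then one filtering pass over csv_data per key collecting row[1:];
-- A instead groups incrementally into a dict and then strips keys in a second in-place phase.
-- A mutates only lists its own dictionary stores (input rows are untouched; j[1:] slices),
-- so return-value equivalence is the whole story.


-- ===== PORT A =====
def parse_shape_key_data_from_csv (csv_data : List (List String)) : List (String × List (List String)) :=
  -- first loop: group each row by its first column (row[0]; Pre_ keeps rows nonempty)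
  let d := csv_data.foldl (fun d shape_key_bone_data =>
    let shape_key := PySem.List.pyGetD shape_key_bone_data 0 ""
    let d := if d.contains shape_key then d else d.insert shape_key ([] : List (List String))
    d.insert shape_key (d.getD shape_key [] ++ [shape_key_bone_data])) PySem.Dict.empty
  -- second loop: for each key, 'for i, j in enumerate(bone_data): bone_data[i] = j[1:]'
  -- (the in-place mutation of the stored list is written back with insert)
  let d := d.keys.foldl (fun d shape_key =>
    let bone_data := d.getD shape_key []
    d.insert shape_key ((PySem.List.enumerate bone_data).foldl
      (fun bd ij => bd.set ij.1.toNat (PySem.List.slice ij.2 (some 1) none)) bone_data)) d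
  d.items

-- ===== PORT B =====
def parse_shape_key_data_from_csv_alt (csv_data : List (List String)) : List (String × List (List String)) :=
  -- keys = list(dict.fromkeys(row[0] for row in csv_data))
  let keys := PySem.List.dedup (csv_data.map (fun row => PySem.List.pyGetD row 0 ""))
  -- {key: [row[1:] for row in csv_data if row[0] == key] for key in keys}
  keys.map (fun key =>
    (key, (csv_data.filter (fun row => PySem.List.pyGetD row 0 "" == key)).map
      (fun row => PySem.List.slice row (some 1) none)))

-- ===== PRECONDITION & SPEC =====
-- Pre_ excludes inputs containing an empty row: both Pythons raise IndexError on row[0] there.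
def Pre_parse_shape_key_data_from_csv (csv_data : List (List String)) : Prop :=
  ∀ row ∈ csv_data, row ≠ []
instance (csv_data : List (List String)) : Decidable (Pre_parse_shape_key_data_from_csv csv_data) := by unfold Pre_parse_shape_key_data_from_csv; infer_instance
def pvWitness_parse_shape_key_data_from_csv : List (List String) :=
  [["a", "1", "x"], ["b", "2"], ["a", "3", "y"]]
def Spec_parse_shape_key_data_from_csv (csv_data : List (List String)) (out : List (String × List (List String))) : Prop := out = parse_shape_key_data_from_csv_alt csv_data
instance (csv_data : List (List String)) (out : List (String × List (List String))) : Decidable (Spec_parse_shape_key_data_from_csv csv_data out) := by unfold Spec_parse_shape_key_data_from_csv; infer_instance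

-- ===== CLAIM (what is proved, stated in full; the proofs are below) =====
def Claim_equal_parse_shape_key_data_from_csv : Prop := ∀ (csv_data : List (List String)), Dom_parse_shape_key_data_from_csv csv_data → Pre_parse_shape_key_data_from_csv csv_data → Spec_parse_shape_key_data_from_csv csv_data (parse_shape_key_data_from_csv csv_data)

-- ===== LEMMAS AND PROOFS =====

-- abbreviations used only by the proofs
def pvKey (row : List String) : String := PySem.List.pyGetD row 0 ""
def pvTail (row : List String) : List String := PySem.List.slice row (some 1) none

-- A's first-loop body is exactly 'modify key [] (· ++ [row])'
lemma stepA_eq_modify (d : PySem.Dict String (List (List String))) (row : List String) :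
    (let k := pvKey row
     let d' := if d.contains k then d else d.insert k ([] : List (List String))
     d'.insert k (d'.getD k [] ++ [row])) = d.modify (pvKey row) [] (· ++ [row]) := by
  show _ = d.insert (pvKey row) (d.getD (pvKey row) [] ++ [row])
  by_cases h : d.contains (pvKey row)
  · simp only [h, if_true]
  · have h' : d.contains (pvKey row) = false := by simpa using h
    simp only [h', Bool.false_eq_true, if_false, PySem.Dict.insert_insert_self,
      PySem.Dict.getD_insert_self, PySem.Dict.getD_of_not_contains d _ h', List.nil_append]

-- A's inner enumerate loop rewrites a list elementwise: it is List.map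
lemma enum_set_map {α : Type} (f : α → α) :
    ∀ (l acc : List α),
      (PySem.List.enumerate l (acc.length : Int)).foldl
        (fun bd ij => bd.set ij.1.toNat (f ij.2)) (acc ++ l) = acc ++ l.map f := by
  intro l
  induction l with
  | nil => intro acc; simp [PySem.List.enumerate]
  | cons x xs ih =>
    intro acc
    rw [PySem.List.enumerate_cons, List.foldl_cons]
    have hset : (acc ++ x :: xs).set ((acc.length : Int)).toNat (f x) = (acc ++ [f x]) ++ xs := by
      rw [List.set_append]; simp
    rw [hset]
    have hlen : (acc.length : Int) + 1 = (((acc ++ [f x]).length : Nat) : Int) := by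
      simp
    rw [hlen, ih (acc ++ [f x])]
    simp

-- getD after the grouped modify-fold, keyed by pvKey (A keeps full rows)
lemma getD_groupFold (g : List String → List String) (csv : List (List String)) (c : String) :
    (csv.foldl (fun d row => d.modify (pvKey row) [] (· ++ [g row])) PySem.Dict.empty).getD c []
      = (csv.filter (fun row => pvKey row == c)).map g := by
  have h := PySem.Dict.getD_foldl_modify_append
      (csv.map (fun row => ((pvKey row), g row))) (PySem.Dict.empty (κ := String) (ν := List (List String))) c
  rw [List.foldl_map] at h
  simpa [List.filter_map, Function.comp] using h

-- keys of the grouped modify-fold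
lemma keys_groupFold (g : List String → List String) (csv : List (List String)) :
    (csv.foldl (fun d row => d.modify (pvKey row) [] (· ++ [g row])) PySem.Dict.empty).keys
      = PySem.Set.ofList (csv.map pvKey) := by
  have h := PySem.Dict.keys_foldl_modify_key csv (fun row => pvKey row)
      ([] : List (List String)) (fun _ row v => v ++ [g row]) PySem.Dict.empty
  simpa [PySem.Dict.keys_empty, PySem.Set.update_empty] using h

lemma nodup_keys_groupFold (g : List String → List String) (csv : List (List String)) :
    (csv.foldl (fun d row => d.modify (pvKey row) [] (· ++ [g row])) PySem.Dict.empty).keys.Nodup := by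
  exact PySem.Dict.nodup_keys_foldl_modify_key csv (fun row => pvKey row) []
    (fun _ row v => v ++ [g row]) PySem.Dict.empty (by simp [PySem.Dict.keys_empty])

-- A's second loop, after enum_set_map: an insert-fold applying g := (·.map pvTail) at each key once
lemma foldl_insert_mapval {ν : Type} (g : ν → ν) (dflt : ν) :
    ∀ (l : List String) (d : PySem.Dict String ν) (c : String), l.Nodup →
      ((l.foldl (fun d k => d.insert k (g (d.getD k dflt))) d).getD c dflt)
        = if c ∈ l then g (d.getD c dflt) else d.getD c dflt := by
  intro l
  induction l with
  | nil => intro d c _; simp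
  | cons k ks ih =>
    intro d c hnd
    rw [List.foldl_cons, ih _ c (List.Nodup.of_cons hnd)]
    by_cases hc : c ∈ ks
    · have hck : c ≠ k := fun he => (List.nodup_cons.mp hnd).1 (he ▸ hc)
      simp [hc, hck, PySem.Dict.getD_insert, List.mem_cons]
    · by_cases hck : c = k
      · subst hck; simp [hc, PySem.Dict.getD_insert_self]
      · simp [hc, hck, PySem.Dict.getD_insert]

lemma keys_phase2 {ν : Type} (g : PySem.Dict String ν → String → ν) (d : PySem.Dict String ν) :
    (d.keys.foldl (fun d k => d.insert k (g d k)) d).keys = d.keys := by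
  rw [PySem.Dict.keys_foldl_insert]
  rw [PySem.Set.update_eq_append_filter]
  have h0 : (PySem.Set.ofList d.keys).filter (fun y => !(PySem.Set.contains d.keys y)) = [] := by
    apply List.filter_eq_nil_iff.mpr
    intro a ha
    simp only [PySem.Set.contains_eq_listContains, Bool.not_eq_true']
    simp [(PySem.Set.mem_ofList _ _).mp ha]
  simp

-- ===== VERDICT (by name: the statement is the Claim_ definition above) =====
theorem parse_shape_key_data_from_csv_spec : Claim_equal_parse_shape_key_data_from_csv := by
  intro csv _ _
  show parse_shape_key_data_from_csv csv = parse_shape_key_data_from_csv_alt csv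
  unfold parse_shape_key_data_from_csv parse_shape_key_data_from_csv_alt
  -- rewrite A's first loop to the modify form
  have h1 : (fun (d : PySem.Dict String (List (List String))) (row : List String) =>
      let k := PySem.List.pyGetD row 0 ""
      let d' := if d.contains k then d else d.insert k ([] : List (List String))
      d'.insert k (d'.getD k [] ++ [row]))
      = fun d row => d.modify (pvKey row) [] (· ++ [row]) := by
    funext d row; exact stepA_eq_modify d row
  simp only [h1]
  -- rewrite A's inner enumerate loop to map
  have h2 : (fun (d : PySem.Dict String (List (List String))) (shape_key : String) =>
      let bone_data := d.getD shape_key []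
      d.insert shape_key ((PySem.List.enumerate bone_data).foldl
        (fun bd ij => bd.set ij.1.toNat (PySem.List.slice ij.2 (some 1) none)) bone_data))
      = fun d k => d.insert k ((d.getD k []).map pvTail) := by
    funext d k
    show d.insert k _ = d.insert k _
    congr 1
    simpa [pvTail] using enum_set_map (f := pvTail) (d.getD k []) []
  simp only [h2]
  set dA := csv.foldl (fun d row => d.modify (pvKey row) [] (· ++ [row])) PySem.Dict.empty with hdA
  set d2 := dA.keys.foldl (fun d k => d.insert k ((d.getD k []).map pvTail)) dA with hd2
  have hkA : dA.keys = PySem.Set.ofList (csv.map pvKey) := keys_groupFold id csv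
  have hk2 : d2.keys = dA.keys := keys_phase2 _ dA
  have hndA : dA.keys.Nodup := nodup_keys_groupFold id csv
  rw [PySem.Dict.items_eq_map_keys d2 (hk2 ▸ hndA) []]
  rw [hk2, hkA]
  rw [show PySem.List.dedup (csv.map (fun row => PySem.List.pyGetD row 0 ""))
        = PySem.Set.ofList (csv.map pvKey) by
      simp only [PySem.List.dedup_eq_ofList]; rfl]
  apply List.map_congr_left
  intro k hkmem
  have hgA : dA.getD k [] = (csv.filter (fun row => pvKey row == k)).map id := getD_groupFold id csv k
  have hg2 : d2.getD k [] = (dA.getD k []).map pvTail := by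
    rw [hd2, foldl_insert_mapval _ _ dA.keys dA k hndA]
    rw [hkA]; simp [hkmem]
  rw [hg2, hgA]
  simp [pvKey, pvTail]
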